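-- pv_equiv track=rewrite | github.com/yorkhackspace/SpacehackServer | server/controls.py | checkSafeWord
-- ===== SOURCE A (Python) =====
-- def checkSafeWord(word, minlen, maxlen, safeletters):
--     """Check if a word can be displayed using a subset of letters, e.g. on a 4-digit 7-seg."""
--     if len(word)>maxlen or len(word) < minlen:
--         return False
--     else:
--         for i in range(len(word)):
--             if word[i].upper() not in safeletters:
--                 return False
--     return True
-- ===== SOURCE B (Python) =====
-- def checkSafeWord(word, minlen, maxlen, safeletters):
--     """Check if a word can be displayed using a subset of letters, e.g. on a 4-digit 7-seg."""
--     if len(word) > maxlen or len(word) < minlen: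
--         return False
--     need = sorted(set(word.upper()))
--     have = sorted(set(safeletters))
--     i = 0
--     for c in need:
--         while i < len(have) and have[i] < c:
--             i += 1
--         if i == len(have) or have[i] != c:
--             return False
--     return True
-- ===== Notes on version B (the rewrite author's own statement) =====
-- stated objective: alternative
-- what changed: Replaced the indexed per-character scan against the raw letter list by sorting the distinct uppercased characters and the distinct allowed letters and deciding inclusion with a single merge-style two-pointer sweep over the two sorted lists.
import Mathlib
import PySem

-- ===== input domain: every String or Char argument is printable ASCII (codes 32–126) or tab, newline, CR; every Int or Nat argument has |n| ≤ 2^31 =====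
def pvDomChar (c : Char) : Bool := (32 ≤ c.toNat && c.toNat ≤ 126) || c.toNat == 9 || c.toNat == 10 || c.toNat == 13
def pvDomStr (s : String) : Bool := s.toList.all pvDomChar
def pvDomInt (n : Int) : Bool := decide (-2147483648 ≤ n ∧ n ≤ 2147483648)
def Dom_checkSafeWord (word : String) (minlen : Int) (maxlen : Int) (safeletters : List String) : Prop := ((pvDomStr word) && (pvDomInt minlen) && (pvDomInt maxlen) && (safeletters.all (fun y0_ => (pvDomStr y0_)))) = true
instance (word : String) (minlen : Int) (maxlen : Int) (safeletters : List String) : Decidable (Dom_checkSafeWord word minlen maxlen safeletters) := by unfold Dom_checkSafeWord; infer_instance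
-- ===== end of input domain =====

-- B replaces the per-character membership scan by sorting the distinct uppercased characters
-- and the distinct allowed letters and checking inclusion with one merge-style two-pointer
-- sweep; objective: alternative algorithm, equivalent on all inputs.

-- ===== PORT A =====
-- the 'for i in range(len(word))' scan with early return, one character at a time
def checkSafeWordLoop (safeletters : List String) : List Char → Bool
  | [] => true
  | c :: rest =>
    if !(safeletters.contains (PySem.Str.upper (String.ofList [c]))) then false
    else checkSafeWordLoop safeletters rest

def checkSafeWord (word : String) (minlen : Int) (maxlen : Int) (safeletters : List String) : Bool :=
  if PySem.Str.len word > maxlen || PySem.Str.len word < minlen then false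
  else checkSafeWordLoop safeletters word.toList

-- ===== PORT B =====
-- the 'for c in need' loop with the inner 'while i < len(have) and have[i] < c' pointer
-- advance; the index i is represented by the remaining suffix of 'have'
def mergeScan : List String → List String → Bool
  | [], _ => true
  | c :: ns, hs =>
    match hs.dropWhile (fun x => decide (x < c)) with
    | [] => false
    | h :: t => if h ≠ c then false else mergeScan ns (h :: t)

def checkSafeWord_alt (word : String) (minlen : Int) (maxlen : Int) (safeletters : List String) : Bool :=
  if PySem.Str.len word > maxlen || PySem.Str.len word < minlen then false
  else
    let need := PySem.List.sorted
      (PySem.Set.ofList ((PySem.Str.upper word).toList.map (fun c => String.ofList [c])))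
      (fun x => x) false
    let haveL := PySem.List.sorted (PySem.Set.ofList safeletters) (fun x => x) false
    mergeScan need haveL

-- ===== PRECONDITION & SPEC =====
def Spec_checkSafeWord (word : String) (minlen : Int) (maxlen : Int) (safeletters : List String) (out : Bool) : Prop := out = checkSafeWord_alt word minlen maxlen safeletters
instance (word : String) (minlen : Int) (maxlen : Int) (safeletters : List String) (out : Bool) : Decidable (Spec_checkSafeWord word minlen maxlen safeletters out) := by unfold Spec_checkSafeWord; infer_instance

-- ===== CLAIM (what is proved, stated in full; the proofs are below) =====
def Claim_equal_checkSafeWord : Prop := ∀ (word : String) (minlen : Int) (maxlen : Int) (safeletters : List String), Dom_checkSafeWord word minlen maxlen safeletters → Spec_checkSafeWord word minlen maxlen safeletters (checkSafeWord word minlen maxlen safeletters)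

-- ===== LEMMAS AND PROOFS =====

-- A's scan returns true iff every uppercased character of the word is an allowed letter
lemma checkSafeWordLoop_eq_all (safeletters : List String) (cs : List Char) :
    checkSafeWordLoop safeletters cs
      = cs.all (fun c => safeletters.contains (PySem.Str.upper (String.ofList [c]))) := by
  induction cs with
  | nil => rfl
  | cons c rest ih => simp [checkSafeWordLoop, ih, List.all_cons]

lemma upper_singleton (c : Char) :
    PySem.Str.upper (String.ofList [c]) = String.ofList [PySem.Chars.upperChar c] := by
  simp [PySem.Str.upper, PySem.Chars.upper, String.toList_ofList]

-- on strictly increasing lists the merge sweep decides list inclusion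
lemma mergeScan_eq_all (ns : List String) :
    ∀ hs : List String, ns.Pairwise (· < ·) → hs.Pairwise (· < ·) →
      mergeScan ns hs = ns.all (fun c => hs.contains c) := by
  induction ns with
  | nil => intro hs _ _; rfl
  | cons c ns ih =>
    intro hs hns hhs
    have hsplit : hs.takeWhile (fun x => decide (x < c)) ++
        hs.dropWhile (fun x => decide (x < c)) = hs := List.takeWhile_append_dropWhile
    have htake : ∀ x ∈ hs.takeWhile (fun x => decide (x < c)), x < c := by
      intro x hx
      simpa using List.mem_takeWhile_imp hx
    have hdroppw : (hs.dropWhile (fun x => decide (x < c))).Pairwise (· < ·) :=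
      hhs.sublist (List.dropWhile_sublist _)
    rcases hd : hs.dropWhile (fun x => decide (x < c)) with _ | ⟨h, t⟩
    · -- pointer ran past the end: c is not among the allowed letters
      have hcnot : ¬ c ∈ hs := by
        intro hc
        rw [← hsplit, hd, List.append_nil] at hc
        exact lt_irrefl c (htake c hc)
      simp only [mergeScan]
      rw [hd]
      simp [List.all_cons, hcnot]
    · have hpw' : (h :: t).Pairwise (· < ·) := by rw [← hd]; exact hdroppw
      have hhead : ¬ h < c := by
        have := List.head?_dropWhile_not (fun x => decide (x < c)) hs
        rw [hd] at this; simpa using this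
      by_cases hhc : h = c
      · subst hhc
        have hmemh : h ∈ hs := by
          rw [← hsplit, hd]; exact List.mem_append_right _ (List.mem_cons_self ..)
        have hmem_iff : ∀ x ∈ ns, (x ∈ hs ↔ x ∈ h :: t) := by
          intro x hx
          have hhx : h < x := (List.pairwise_cons.mp hns).1 x hx
          constructor
          · intro hxin
            rw [← hsplit, hd] at hxin
            rcases List.mem_append.mp hxin with h1 | h1
            · exact absurd (lt_trans hhx (htake x h1)) (lt_irrefl h)
            · exact h1
          · intro hxin; rw [← hsplit, hd]; exact List.mem_append_right _ hxin
        have hall : (ns.all fun x => decide (x ∈ h :: t)) = ns.all fun x => decide (x ∈ hs) := by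
          rw [Bool.eq_iff_iff]
          simp only [List.all_eq_true, decide_eq_true_eq]
          exact ⟨fun H x hx => (hmem_iff x hx).mpr (H x hx),
                 fun H x hx => (hmem_iff x hx).mp (H x hx)⟩
        simp only [mergeScan]
        rw [hd]
        simp [ih (h :: t) (List.pairwise_cons.mp hns).2 hpw', List.all_cons, hmemh,
          ← hall, List.mem_cons]
      · -- first remaining allowed letter is already past c: c is not allowed
        have hcnot : ¬ c ∈ hs := by
          intro hc
          rw [← hsplit, hd] at hc
          rcases List.mem_append.mp hc with h1 | h1
          · exact lt_irrefl c (htake c h1)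
          · rcases List.mem_cons.mp h1 with h2 | h2
            · exact hhc h2.symm
            · exact hhead ((List.pairwise_cons.mp hpw').1 c h2)
        simp only [mergeScan]
        rw [hd]
        simp [hhc, List.all_cons, hcnot]

-- ===== VERDICT (by name: the statement is the Claim_ definition above) =====
theorem checkSafeWord_spec : Claim_equal_checkSafeWord := by
  intro word minlen maxlen safeletters _
  unfold Spec_checkSafeWord checkSafeWord checkSafeWord_alt
  by_cases hlen : (decide (PySem.Str.len word > maxlen) || decide (PySem.Str.len word < minlen)) = true
  · rw [if_pos hlen, if_pos hlen]
  · rw [if_neg hlen, if_neg hlen]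
    rw [checkSafeWordLoop_eq_all,
      mergeScan_eq_all _ _ (PySem.List.sorted_ofList_pairwise_lt _)
        (PySem.List.sorted_ofList_pairwise_lt _)]
    rw [Bool.eq_iff_iff]
    simp only [List.all_eq_true, List.contains_iff_mem, PySem.List.mem_sorted,
      PySem.Set.mem_ofList, List.mem_map, PySem.Str.toList_upper]
    constructor
    · rintro hA x ⟨c, hc, rfl⟩
      obtain ⟨c0, hc0, rfl⟩ := List.mem_map.mp hc
      have := hA c0 hc0
      rwa [upper_singleton] at this
    · intro hB c hc
      have := hB (String.ofList [PySem.Chars.upperChar c])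
        ⟨PySem.Chars.upperChar c, List.mem_map.mpr ⟨c, hc, rfl⟩, rfl⟩
      rw [upper_singleton]
      exact this
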